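/- GENERATED by farm/mkstatement.py from design/units.tsv (unit `predict_point`) and the Specs of Vorbis/Spec/*.lean — do not edit.
   THE STATEMENT of the proof unit `predict_point`: the function `predict_point` (30 instructions) satisfies its contract,
   given the contracts of its callees. What the names mean: Vorbis/Spec/Basic.lean. The theorem to prove:
   `theorem predict_point_ok : Vorbis.Spec.predict_point.Statement`. -/
import Vorbis.Spec.LibcMisc
import Vorbis.Spec.PacketRest
namespace Vorbis.Spec.predict_point
open X86 X86.User Asan

/-- The statement of unit `predict_point`. -/
def Statement : Prop :=
  ∀ (Lay : Layout) (_hLay : Lay.hi = 0x1000000) (μ : Microarch) (_hμ : UserX.MicroOK μ) (u₀ : State)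
    (_hcode : HasCodeNat Lay u₀ Vorbis.L.predict_point.entry Vorbis.Code.code_predict_point.nat Vorbis.L.predict_point.size)
    (_h_abs : ∀ (others : List Obj) (frames : List (Nat × FrameLayout)), Calls Lay μ Vorbis.WayInv (Vorbis.conv u₀) Vorbis.L.abs.entry (Vorbis.Spec.abs.spec others frames)),
    ∀ (others : List Obj) (frames : List (Nat × FrameLayout)), Calls Lay μ Vorbis.WayInv (Vorbis.conv u₀) Vorbis.L.predict_point.entry (Vorbis.Spec.predict_point.spec others frames)

end Vorbis.Spec.predict_point
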